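-- pv_equiv track=rewrite | github.com/pi314mm/wordle | wordle.py | bestword
-- ===== SOURCE A (Python) =====
-- def synth(word,guess):
--     available = dict()
--     for a in word:
--         available[a]=available.get(a,0)+1
--     twos = []
--     for w,g in zip(word,guess):
--         if w==g:
--             twos.append(2)
--             available[w]=available[w]-1
--         else:
--             twos.append(0)
--     result = []
--     for g,v in zip(guess,twos):
--         if v==2:
--             result.append(2)
--         else:
--             if available.get(g,0)>0:
--                 result.append(1)
--                 available[g]=available[g]-1
--             else:
--                 result.append(0)
--     return result
--
-- def check(guess,result):
--     def check2(word):
--         return synth(word,guess)==result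
--     return check2
--
-- def bestword(possible,english):
--     bestval = len(english)
--     best = ""
--     for i,guess in zip(range(len(english)),english):
--         guessmax = 0
--         for solution in possible:
--             guessmax = max(len(list(filter(check(guess,synth(solution,guess)),possible))),guessmax)
--             if guessmax>bestval:
--                 pass
--         if guessmax<bestval:
--             best=guess
--             bestval=guessmax
--     return best
-- ===== SOURCE B (Python) =====
-- def synth(word, guess):
--     available = dict()
--     for a in word:
--         available[a] = available.get(a, 0) + 1
--     twos = []
--     for w, g in zip(word, guess):
--         if w == g:
--             twos.append(2)
--             available[w] = available[w] - 1
--         else: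
--             twos.append(0)
--     result = []
--     for g, v in zip(guess, twos):
--         if v == 2:
--             result.append(2)
--         else:
--             if available.get(g, 0) > 0:
--                 result.append(1)
--                 available[g] = available[g] - 1
--             else:
--                 result.append(0)
--     return result
--
-- def bestword(possible, english):
--     bestval = len(english)
--     best = ""
--     for guess in english:
--         pats = [tuple(synth(s, guess)) for s in possible]
--         counts = {}
--         for p in pats:
--             counts[p] = counts.get(p, 0) + 1
--         guessmax = 0
--         for p in pats:
--             guessmax = max(counts[p], guessmax)
--         if guessmax < bestval:
--             best = guess
--             bestval = guessmax
--     return best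
-- ===== Notes on version B (the rewrite author's own statement) =====
-- stated objective: faster
-- what changed: Per guess, B computes each solution's feedback pattern once, counts patterns in a dict and takes the max count over the pattern list, replacing A's inner filter-of-possible scan (with synth recomputed) for every solution.
import Mathlib
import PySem

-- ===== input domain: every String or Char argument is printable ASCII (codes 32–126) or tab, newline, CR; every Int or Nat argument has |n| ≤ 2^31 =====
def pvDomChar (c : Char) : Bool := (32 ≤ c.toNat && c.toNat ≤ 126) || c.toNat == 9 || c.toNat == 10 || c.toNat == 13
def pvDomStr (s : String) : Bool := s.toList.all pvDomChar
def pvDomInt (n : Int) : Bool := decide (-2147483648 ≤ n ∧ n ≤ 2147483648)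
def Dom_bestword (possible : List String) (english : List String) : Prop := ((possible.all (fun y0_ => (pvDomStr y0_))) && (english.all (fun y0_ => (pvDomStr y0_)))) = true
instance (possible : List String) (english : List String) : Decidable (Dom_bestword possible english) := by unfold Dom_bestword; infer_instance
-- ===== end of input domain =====

-- B groups possible by feedback pattern with a counter dict per guess (max bucket count) instead of
-- A's inner filter scan over possible for every solution: same result, asymptotically fewer synth calls.


-- ===== PORT A =====
-- shared module helper synth(word, guess): Wordle feedback pattern (used verbatim by both Pythons)
def synth (word guess : String) : List Int :=
  let available : PySem.Dict Char Int :=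
    word.toList.foldl (fun d a => d.insert a (d.getD a 0 + 1)) PySem.Dict.empty
  -- second loop: available[w] = available[w] - 1 ; w is always a key of available, so getD is exact
  let st1 := (word.toList.zip guess.toList).foldl
    (fun (st : List Int × PySem.Dict Char Int) wg =>
      if wg.1 == wg.2 then (st.1 ++ [2], st.2.insert wg.1 (st.2.getD wg.1 0 - 1))
      else (st.1 ++ [0], st.2)) ([], available)
  let st2 := (guess.toList.zip st1.1).foldl
    (fun (st : List Int × PySem.Dict Char Int) gv =>
      if gv.2 == 2 then (st.1 ++ [2], st.2)
      else if st.2.getD gv.1 0 > 0 then (st.1 ++ [1], st.2.insert gv.1 (st.2.getD gv.1 0 - 1))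
      else (st.1 ++ [0], st.2)) ([], st1.2)
  st2.1

def bestword (possible : List String) (english : List String) : String :=
  (english.foldl
    (fun (st : Int × String) guess =>
      let guessmax := possible.foldl
        (fun gm solution =>
          max ((possible.filter (fun w => synth w guess == synth solution guess)).length : Int) gm) 0
      if guessmax < st.1 then (guessmax, guess) else st)
    ((english.length : Int), "")).2

-- ===== PORT B =====
def bestword_alt (possible : List String) (english : List String) : String :=
  (english.foldl
    (fun (st : Int × String) guess =>
      let pats := possible.map (fun s => synth s guess)
      let counts : PySem.Dict (List Int) Int :=
        pats.foldl (fun d p => d.insert p (d.getD p 0 + 1)) PySem.Dict.empty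
      -- counts[p]: p is always a key of counts, so getD is exact
      let guessmax := pats.foldl (fun gm p => max (counts.getD p 0) gm) 0
      if guessmax < st.1 then (guessmax, guess) else st)
    ((english.length : Int), "")).2

-- ===== PRECONDITION & SPEC =====
def Spec_bestword (possible : List String) (english : List String) (out : String) : Prop := out = bestword_alt possible english
instance (possible : List String) (english : List String) (out : String) : Decidable (Spec_bestword possible english out) := by unfold Spec_bestword; infer_instance

-- ===== CLAIM (what is proved, stated in full; the proofs are below) =====
def Claim_equal_bestword : Prop := ∀ (possible : List String) (english : List String), Dom_bestword possible english → Spec_bestword possible english (bestword possible english)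

-- ===== LEMMAS AND PROOFS =====

-- per guess: A's filter length over possible equals B's counter lookup on the pattern list
theorem inner_eq (possible : List String) (guess : String) :
    possible.foldl
      (fun gm solution =>
        max ((possible.filter (fun w => synth w guess == synth solution guess)).length : Int) gm) 0
    = (possible.map (fun s => synth s guess)).foldl
      (fun gm p =>
        max (((possible.map (fun s => synth s guess)).foldl
              (fun d p => d.insert p (d.getD p 0 + 1)) PySem.Dict.empty).getD p 0) gm) 0 := by
  rw [PySem.Dict.foldl_insert_getD_add_one_eq_counter, List.foldl_map]
  refine List.foldl_ext _ _ _ (fun gm s _hs => ?_)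
  rw [PySem.Dict.getD_counter]
  congr 1
  rw [List.count_eq_countP, List.countP_map, List.countP_eq_length_filter]
  rfl

-- ===== VERDICT (by name: the statement is the Claim_ definition above) =====
theorem bestword_spec : Claim_equal_bestword := by
  intro possible english _
  show bestword possible english = bestword_alt possible english
  unfold bestword bestword_alt
  congr 1
  refine List.foldl_ext _ _ _ (fun st guess _hg => ?_)
  simp only [inner_eq possible guess]
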